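-- pv_equiv track=rewrite | github.com/Hideki-1029/dolce-qd-experiment-2025 | compare_defocus.py | extract_last4_digits
-- ===== SOURCE A (Python) =====
-- from typing import List, Optional, Tuple
--
-- def extract_last4_digits(stem: str) -> Optional[int]:
--     digits = "".join(ch for ch in stem if ch.isdigit())
--     if not digits:
--         return None
--     try:
--         return int(digits[-4:])
--     except ValueError:
--         return None
-- ===== SOURCE B (Python) =====
-- def extract_last4_digits(stem):
--     # Backward single pass: collect only the last <=4 digit characters,
--     # stopping early once 4 have been found.
--     buf = []
--     for ch in reversed(stem):
--         if ch.isdigit():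
--             buf.append(ch)
--             if len(buf) == 4:
--                 break
--     if not buf:
--         return None
--     return int("".join(reversed(buf)))
-- ===== Notes on version B (the rewrite author's own statement) =====
-- stated objective: alternative
-- what changed: Replaces A's full forward pass that builds the whole digit string and slices its last 4 characters with a backward early-terminating scan that keeps only the last <=4 digits and stops as soon as 4 are found.
import Mathlib
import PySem

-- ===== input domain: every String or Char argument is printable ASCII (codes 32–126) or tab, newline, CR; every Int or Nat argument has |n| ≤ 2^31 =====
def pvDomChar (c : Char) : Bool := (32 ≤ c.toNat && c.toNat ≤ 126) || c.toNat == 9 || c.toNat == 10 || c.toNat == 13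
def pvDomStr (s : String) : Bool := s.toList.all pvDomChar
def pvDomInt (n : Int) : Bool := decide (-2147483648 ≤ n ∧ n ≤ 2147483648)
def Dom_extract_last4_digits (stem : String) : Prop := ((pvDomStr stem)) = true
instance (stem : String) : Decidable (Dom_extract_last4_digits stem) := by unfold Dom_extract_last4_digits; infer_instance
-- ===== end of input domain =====

-- B replaces A's full forward digit-string build + slice by a backward early-terminating
-- scan keeping only the last <=4 digits (objective: alternative decomposition).

-- ===== PORT A =====
-- digits = "".join(ch for ch in stem if ch.isdigit()); if not digits: None;
-- int(digits[-4:]) — int() of a nonempty digit string never raises, and the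
-- except-ValueError branch returning None is exactly ofChars? mapping none to none.
def extract_last4_digits (stem : String) : Option Int :=
  if stem.toList.filter PySem.Chars.isdigit = [] then none
  else PySem.Int.ofChars?
    (PySem.List.slice (stem.toList.filter PySem.Chars.isdigit) (some (-4)) none)

-- ===== PORT B =====
-- loop 'for ch in reversed(stem): if ch.isdigit(): buf.append(ch); if len(buf)==4: break'.
-- Python appends and reverses buf at the end; the port prepends, producing the same
-- original-order list directly.
def pvGoB : List Char → List Char → List Char
  | [], acc => acc
  | c :: rest, acc =>
    if PySem.Chars.isdigit c then
      if (c :: acc).length = 4 then c :: acc else pvGoB rest (c :: acc)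
    else pvGoB rest acc

def extract_last4_digits_alt (stem : String) : Option Int :=
  if pvGoB stem.toList.reverse [] = [] then none
  else PySem.Int.ofChars? (pvGoB stem.toList.reverse [])   -- int("".join(reversed(buf))): never raises on nonempty digits

-- ===== PRECONDITION & SPEC =====
def Spec_extract_last4_digits (stem : String) (out : Option Int) : Prop := out = extract_last4_digits_alt stem
instance (stem : String) (out : Option Int) : Decidable (Spec_extract_last4_digits stem out) := by unfold Spec_extract_last4_digits; infer_instance

-- ===== CLAIM (what is proved, stated in full; the proofs are below) =====
def Claim_equal_extract_last4_digits : Prop := ∀ (stem : String), Dom_extract_last4_digits stem → Spec_extract_last4_digits stem (extract_last4_digits stem)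

-- ===== LEMMAS AND PROOFS =====

-- Invariant of B's backward scan: with fewer than 4 chars collected,
-- the result is the last-4 suffix of (digits of the unscanned prefix) ++ acc.
lemma pvGoB_eq (l acc : List Char) (h : acc.length < 4) :
    pvGoB l acc =
      (l.reverse.filter PySem.Chars.isdigit ++ acc).drop
        ((l.reverse.filter PySem.Chars.isdigit ++ acc).length - 4) := by
  induction l generalizing acc with
  | nil => simp [pvGoB, Nat.sub_eq_zero_of_le (by omega : acc.length ≤ 4)]
  | cons c rest ih =>
    simp only [pvGoB, List.reverse_cons, List.filter_append, List.filter_cons]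
    by_cases hd : PySem.Chars.isdigit c
    · simp only [hd, if_pos, List.filter_nil]
      by_cases h4 : (c :: acc).length = 4
      · simp only [h4, if_pos]
        have heq : rest.reverse.filter PySem.Chars.isdigit ++ [c] ++ acc
             = rest.reverse.filter PySem.Chars.isdigit ++ (c :: acc) := by simp
        rw [heq]
        have hlen : (rest.reverse.filter PySem.Chars.isdigit ++ (c :: acc)).length - 4
             = (rest.reverse.filter PySem.Chars.isdigit).length := by simp [h4]
        rw [hlen, List.drop_left]
      · rw [if_neg h4, ih (c :: acc) (by simp at h4 ⊢; omega)]
        congr 1 <;> simp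
    · rw [if_neg hd, if_neg hd]
      simp only [List.filter_nil, List.append_nil]
      exact ih acc h

lemma drop_sub4_eq_nil_iff (D : List Char) :
    D.drop (D.length - 4) = [] ↔ D = [] := by
  rw [List.drop_eq_nil_iff, List.eq_nil_iff_length_eq_zero]
  omega

-- ===== VERDICT (by name: the statement is the Claim_ definition above) =====
theorem extract_last4_digits_spec : Claim_equal_extract_last4_digits := by
  intro stem _
  unfold Spec_extract_last4_digits extract_last4_digits extract_last4_digits_alt
  have hgo := pvGoB_eq stem.toList.reverse [] (by simp)
  simp only [List.reverse_reverse, List.append_nil] at hgo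
  rw [hgo, PySem.List.slice_from_neg_ofNat (stem.toList.filter PySem.Chars.isdigit) 4 (by omega)]
  set D := stem.toList.filter PySem.Chars.isdigit with hD
  by_cases hnil : D = []
  · simp [hnil]
  · rw [if_neg hnil, if_neg (by rw [drop_sub4_eq_nil_iff]; exact hnil)]
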